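-- pv_equiv track=rewrite | github.com/Grunger/EGE | Silvertests/23/05.05.py | f
-- ===== SOURCE A (Python) =====
-- def f(st, fn, way):
--     if '111' in way or '222' in way or '333' in way:
--         return 0
--     if st > fn:
--         return 0
--     if st == fn:
--         return 1
--     return f(st + 1, fn, way + '1') + \
--            f(st * 2, fn, way + '2') + \
--            f(st * 3, fn, way + '3')
-- ===== SOURCE B (Python) =====
-- def f(st, fn, way):
--     if '111' in way or '222' in way or '333' in way:
--         return 0
--     last = 0
--     run = 0
--     if way and way[-1] in '123':
--         c = way[-1]
--         last = 1 if c == '1' else 2 if c == '2' else 3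
--         run = 2 if len(way) >= 2 and way[-2] == c else 1
--     memo = {}
--
--     def count(v, last, run):
--         if v > fn:
--             return 0
--         if v == fn:
--             return 1
--         key = (v, last, run)
--         if key in memo:
--             return memo[key]
--         total = 0
--         if last != 1:
--             total += count(v + 1, 1, 1)
--         elif run < 2:
--             total += count(v + 1, 1, run + 1)
--         if last != 2:
--             total += count(v * 2, 2, 1)
--         elif run < 2:
--             total += count(v * 2, 2, run + 1)
--         if last != 3:
--             total += count(v * 3, 3, 1)
--         elif run < 2:
--             total += count(v * 3, 3, run + 1)
--         memo[key] = total
--         return total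
--
--     return count(st, last, run)
-- ===== Notes on version B (the rewrite author's own statement) =====
-- stated objective: alternative
-- what changed: Replaces the tree recursion that carries a growing move string (re-scanned for '111'/'222'/'333' at every node) by a memoized DP on the compressed state (current value, last move, run length), with the initial string reduced once to its trailing-run state.
import Mathlib
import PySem

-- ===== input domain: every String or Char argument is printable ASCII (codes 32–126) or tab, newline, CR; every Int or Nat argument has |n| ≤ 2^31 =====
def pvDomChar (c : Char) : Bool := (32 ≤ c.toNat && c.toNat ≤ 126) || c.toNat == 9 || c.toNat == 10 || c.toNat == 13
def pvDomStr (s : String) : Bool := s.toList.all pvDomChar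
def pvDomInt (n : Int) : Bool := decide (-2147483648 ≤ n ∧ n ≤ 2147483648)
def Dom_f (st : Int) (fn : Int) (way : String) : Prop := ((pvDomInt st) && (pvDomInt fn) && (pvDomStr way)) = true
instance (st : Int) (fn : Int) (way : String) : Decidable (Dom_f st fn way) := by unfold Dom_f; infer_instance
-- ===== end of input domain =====

-- B replaces A's tree recursion over a growing move string by a memoized DP on the state
-- (current value, last move, run length); proved equal on every input where the Python A returns.

-- ===== PORT A =====
-- Python's "'111' in way or '222' in way or '333' in way" (PySem.Chars.isIn = Python's 'in')
def hasTrip (w : List Char) : Bool :=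
  PySem.Chars.isIn ['1','1','1'] w || PySem.Chars.isIn ['2','2','2'] w || PySem.Chars.isIn ['3','3','3'] w

-- A's recursion; fuel is a pure totality guard: under Pre_f every recursive call strictly
-- increases st (st ≥ 1 there), so fuel (fn - st).toNat + 1 is never exhausted.
def fA (fn : Int) : Nat → Int → List Char → Int
  | 0, _, _ => 0
  | fuel+1, st, way =>
    if hasTrip way then 0
    else if st > fn then 0
    else if st = fn then 1
    else fA fn fuel (st + 1) (way ++ ['1']) + fA fn fuel (st * 2) (way ++ ['2'])
         + fA fn fuel (st * 3) (way ++ ['3'])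

def f (st : Int) (fn : Int) (way : String) : Int :=
  fA fn ((fn - st).toNat + 1) st way.toList

-- ===== PORT B =====
-- Source B's inline reduction of `way` to its trailing-run state (last move as 0/1/2/3, run length)
def lrOf (w : List Char) : Int × Int :=
  match PySem.List.pyGet? w (-1) with
  | some c =>
    if c = '1' ∨ c = '2' ∨ c = '3' then
      ((if c = '1' then 1 else if c = '2' then 2 else 3 : Int),
       if 2 ≤ w.length ∧ PySem.List.pyGet? w (-2) = some c then 2 else 1)
    else (0, 0)
  | none => (0, 0)

-- Source B's memoized `count`, the memo dict threaded through; same fuel guard as port A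
def fB (fn : Int) : Nat → Int → Int → Int → PySem.Dict (Int × Int × Int) Int →
    Int × PySem.Dict (Int × Int × Int) Int
  | 0, _, _, _, memo => (0, memo)
  | fuel+1, v, last, run, memo =>
    if v > fn then (0, memo)
    else if v = fn then (1, memo)
    else
      match memo.get? (v, last, run) with
      | some t => (t, memo)
      | none =>
        let r1 := if last ≠ 1 then fB fn fuel (v + 1) 1 1 memo
                  else if run < 2 then fB fn fuel (v + 1) 1 (run + 1) memo else (0, memo)
        let r2 := if last ≠ 2 then fB fn fuel (v * 2) 2 1 r1.2
                  else if run < 2 then fB fn fuel (v * 2) 2 (run + 1) r1.2 else (0, r1.2)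
        let r3 := if last ≠ 3 then fB fn fuel (v * 3) 3 1 r2.2
                  else if run < 2 then fB fn fuel (v * 3) 3 (run + 1) r2.2 else (0, r2.2)
        let tot := r1.1 + r2.1 + r3.1
        (tot, r3.2.insert (v, last, run) tot)

def f_alt (st : Int) (fn : Int) (way : String) : Int :=
  let w := way.toList
  if hasTrip w then 0
  else
    let lr := lrOf w
    (fB fn ((fn - st).toNat + 1) st lr.1 lr.2 PySem.Dict.empty).1

-- ===== PRECONDITION & SPEC =====
-- Pre_f excludes exactly the inputs (st ≤ 0 and st < fn and no '111'/'222'/'333' in way) on which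
-- the Python A recurses forever (along the '2','3','2','3',… branch st never passes fn) and dies
-- with RecursionError; A returns a value on every input Pre_f admits.
def Pre_f (st : Int) (fn : Int) (way : String) : Prop :=
  1 ≤ st ∨ fn ≤ st ∨ hasTrip way.toList = true

instance (st : Int) (fn : Int) (way : String) : Decidable (Pre_f st fn way) := by
  unfold Pre_f; infer_instance

def pvWitness_f : Int × Int × String := (1, 10, "")

def Spec_f (st : Int) (fn : Int) (way : String) (out : Int) : Prop := out = f_alt st fn way
instance (st : Int) (fn : Int) (way : String) (out : Int) : Decidable (Spec_f st fn way out) := by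
  unfold Spec_f; infer_instance

-- ===== CLAIM (what is proved, stated in full; the proofs are below) =====
def Claim_equal_f : Prop :=
  ∀ (st : Int) (fn : Int) (way : String), Dom_f st fn way → Pre_f st fn way →
    Spec_f st fn way (f st fn way)

-- ===== LEMMAS AND PROOFS =====

def mvChar (d : Int) : Char := if d = 1 then '1' else if d = 2 then '2' else '3'

lemma pg1 (w : List Char) : PySem.List.pyGet? w (-1) = w.reverse.head? := by
  rw [PySem.List.pyGet?_neg_one, List.head?_reverse]

lemma pg2 (w : List Char) : PySem.List.pyGet? w (-2) = w.reverse[1]? := by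
  by_cases h : 2 ≤ w.length
  · rw [PySem.List.pyGet?_neg_ofNat w 2 (by omega) (by omega),
      List.getElem?_reverse (by omega : 1 < w.length)]
    congr 1
  · rw [(PySem.List.pyGet?_eq_none_iff w (-2)).mpr, Eq.comm, List.getElem?_eq_none_iff.mpr]
    · simp; omega
    · intro hr; exact absurd hr.1 (by omega)

lemma pg2' (w : List Char) (c : Char) : PySem.List.pyGet? (w ++ [c]) (-2) = PySem.List.pyGet? w (-1) := by
  rw [pg2, pg1, List.reverse_append]
  simp [List.head?_eq_getElem?]

lemma prefix2_rev (w : List Char) (e : Char) :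
    [e, e] <+: w.reverse ↔ (PySem.List.pyGet? w (-1) = some e ∧ PySem.List.pyGet? w (-2) = some e) := by
  rw [pg1, pg2]
  rcases hw : w.reverse with _ | ⟨a, _ | ⟨b, t⟩⟩
  · simp
  · simp [List.cons_prefix_cons]
  · simp [List.cons_prefix_cons]
    constructor
    · rintro ⟨h1, h2⟩; exact ⟨h1.symm, h2.symm⟩
    · rintro ⟨h1, h2⟩; exact ⟨h1.symm, h2.symm⟩

lemma isIn_triple_concat (w : List Char) (e c : Char)
    (hw : PySem.Chars.isIn [e, e, e] w = false) :
    (PySem.Chars.isIn [e, e, e] (w ++ [c]) = true) ↔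
      (c = e ∧ PySem.List.pyGet? w (-1) = some e ∧ PySem.List.pyGet? w (-2) = some e) := by
  rw [PySem.Chars.isIn_iff_infix]
  have hrev : ([e, e, e] : List Char) <:+: (w ++ [c]) ↔
      ([e, e, e] : List Char) <:+: (c :: w.reverse) := by
    rw [← List.reverse_infix]; simp
  rw [hrev, List.infix_cons_iff]
  have hsec : ¬ (([e, e, e] : List Char) <:+: w.reverse) := by
    intro h
    have h2 : ([e, e, e] : List Char) <:+: w := List.reverse_infix.mp (by simpa using h)
    rw [← PySem.Chars.isIn_iff_infix] at h2
    simp [hw] at h2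
  constructor
  · rintro (h | h)
    · rw [List.cons_prefix_cons] at h
      exact ⟨h.1.symm, (prefix2_rev w e).mp h.2⟩
    · exact absurd h hsec
  · rintro ⟨h1, h2⟩
    left
    rw [List.cons_prefix_cons]
    exact ⟨h1.symm, (prefix2_rev w e).mpr h2⟩

lemma len2_of_pg2 (w : List Char) (x : Char) (h : PySem.List.pyGet? w (-2) = some x) :
    2 ≤ w.length := by
  by_contra hl
  rw [(PySem.List.pyGet?_eq_none_iff w (-2)).mpr (fun hr => absurd hr.1 (by omega))] at h
  exact absurd h (by simp)

lemma lrOf_fst_iff (w : List Char) (d : Int) (hd : d = 1 ∨ d = 2 ∨ d = 3) :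
    (lrOf w).1 = d ↔ PySem.List.pyGet? w (-1) = some (mvChar d) := by
  rcases h : PySem.List.pyGet? w (-1) with _ | c
  · rcases hd with rfl | rfl | rfl <;> simp [lrOf, h, mvChar]
  · rcases hd with rfl | rfl | rfl <;>
      by_cases h1 : c = '1' <;> by_cases h2 : c = '2' <;> by_cases h3 : c = '3' <;>
      simp_all [lrOf, mvChar]

lemma lrOf_pair_iff (w : List Char) (d : Int) (hd : d = 1 ∨ d = 2 ∨ d = 3) :
    ((lrOf w).1 = d ∧ (lrOf w).2 = 2) ↔
      (PySem.List.pyGet? w (-1) = some (mvChar d) ∧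
       PySem.List.pyGet? w (-2) = some (mvChar d)) := by
  constructor
  · rintro ⟨h1, h2⟩
    have hg := (lrOf_fst_iff w d hd).mp h1
    refine ⟨hg, ?_⟩
    rcases hd with rfl | rfl | rfl <;>
      (simp only [lrOf, hg, mvChar] at h2; simp at h2; simp [mvChar]; exact h2.2)
  · rintro ⟨h1, h2⟩
    have hl := len2_of_pg2 w _ h2
    refine ⟨(lrOf_fst_iff w d hd).mpr h1, ?_⟩
    rcases hd with rfl | rfl | rfl <;> simp_all [lrOf, mvChar]

lemma lrOf_snd12 (w : List Char) (hne : (lrOf w).1 ≠ 0) :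
    (lrOf w).2 = 1 ∨ (lrOf w).2 = 2 := by
  rcases h : PySem.List.pyGet? w (-1) with _ | c <;> simp_all [lrOf] <;> split_ifs <;> simp_all

lemma lrOf_append (w : List Char) (d : Int) (hd : d = 1 ∨ d = 2 ∨ d = 3) :
    lrOf (w ++ [mvChar d]) =
      (d, if PySem.List.pyGet? w (-1) = some (mvChar d) then 2 else 1) := by
  have h1 : PySem.List.pyGet? (w ++ [mvChar d]) (-1) = some (mvChar d) :=
    PySem.List.pyGet?_neg_one_append_singleton w (mvChar d)
  have h2 := pg2' w (mvChar d)
  by_cases hg : PySem.List.pyGet? w (-1) = some (mvChar d)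
  · have hne : w ≠ [] := by
      intro h; rw [h] at hg; simp [PySem.List.pyGet?_neg_one] at hg
    have hlen : 2 ≤ (w ++ [mvChar d]).length := by
      simp; cases w <;> simp_all
    rcases hd with rfl | rfl | rfl <;>
      simp_all [lrOf, mvChar]
  · rcases hd with rfl | rfl | rfl <;> simp_all [lrOf, mvChar]

lemma hasTrip_false (w : List Char) (hw : hasTrip w = false) (e : Char) (he : e ∈ ['1','2','3']) :
    PySem.Chars.isIn [e, e, e] w = false := by
  simp [hasTrip] at hw
  simp only [List.mem_cons] at he
  rcases he with rfl | rfl | rfl | h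
  · exact hw.1.1
  · exact hw.1.2
  · exact hw.2
  · cases h

lemma hasTrip_append_iff (w : List Char) (d : Int) (hd : d = 1 ∨ d = 2 ∨ d = 3)
    (hw : hasTrip w = false) :
    hasTrip (w ++ [mvChar d]) = true ↔ ((lrOf w).1 = d ∧ (lrOf w).2 = 2) := by
  rw [lrOf_pair_iff w d hd]
  have i1 := isIn_triple_concat w '1' (mvChar d) (hasTrip_false w hw '1' (by simp))
  have i2 := isIn_triple_concat w '2' (mvChar d) (hasTrip_false w hw '2' (by simp))
  have i3 := isIn_triple_concat w '3' (mvChar d) (hasTrip_false w hw '3' (by simp))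
  simp only [hasTrip, Bool.or_eq_true]
  rw [i1, i2, i3]
  rcases hd with rfl | rfl | rfl <;> simp [mvChar]

def gRec (fn : Int) : Nat → Int → Int → Int → Int
  | 0, _, _, _ => 0
  | fuel+1, v, last, run =>
    if v > fn then 0
    else if v = fn then 1
    else
      (if last ≠ 1 then gRec fn fuel (v + 1) 1 1
       else if run < 2 then gRec fn fuel (v + 1) 1 (run + 1) else 0)
      + (if last ≠ 2 then gRec fn fuel (v * 2) 2 1
         else if run < 2 then gRec fn fuel (v * 2) 2 (run + 1) else 0)
      + (if last ≠ 3 then gRec fn fuel (v * 3) 3 1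
         else if run < 2 then gRec fn fuel (v * 3) 3 (run + 1) else 0)

lemma fA_triple (fn : Int) (fuel : Nat) (st : Int) (w : List Char) (h : hasTrip w = true) :
    fA fn fuel st w = 0 := by cases fuel <;> simp [fA, h]

lemma child_eq (fn : Int) (fuel : Nat) (w : List Char) (d : Int) (hd : d = 1 ∨ d = 2 ∨ d = 3)
    (hw : hasTrip w = false)
    (IH : ∀ st w', hasTrip w' = false → fA fn fuel st w' = gRec fn fuel st (lrOf w').1 (lrOf w').2)
    (v' : Int) :
    fA fn fuel v' (w ++ [mvChar d]) =
      (if (lrOf w).1 ≠ d then gRec fn fuel v' d 1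
       else if (lrOf w).2 < 2 then gRec fn fuel v' d ((lrOf w).2 + 1) else 0) := by
  by_cases htr : hasTrip (w ++ [mvChar d]) = true
  · have hpair := (hasTrip_append_iff w d hd hw).mp htr
    rw [fA_triple fn fuel v' _ htr, if_neg (by simp [hpair.1]), if_neg (by omega)]
  · have htr' : hasTrip (w ++ [mvChar d]) = false := by
      cases h : hasTrip (w ++ [mvChar d]) <;> simp_all
    have hnp := (not_iff_not.mpr (hasTrip_append_iff w d hd hw)).mp (by simp [htr'])
    rw [IH v' _ htr', lrOf_append w d hd]
    by_cases hfst : (lrOf w).1 = d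
    · have hg := (lrOf_fst_iff w d hd).mp hfst
      have hrun : (lrOf w).2 = 1 := by
        have h12 := lrOf_snd12 w (by rcases hd with rfl | rfl | rfl <;> omega)
        rcases h12 with h | h
        · exact h
        · exact absurd ⟨hfst, h⟩ hnp
      rw [if_pos hg, if_neg (by simp [hfst]), if_pos (by omega), hrun]; norm_num
    · have hg : ¬ PySem.List.pyGet? w (-1) = some (mvChar d) :=
        fun h => hfst ((lrOf_fst_iff w d hd).mpr h)
      rw [if_neg hg, if_pos hfst]

lemma fA_eq_gRec (fn : Int) (fuel : Nat) (st : Int) (w : List Char) (hw : hasTrip w = false) :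
    fA fn fuel st w = gRec fn fuel st (lrOf w).1 (lrOf w).2 := by
  induction fuel generalizing st w with
  | zero => rfl
  | succ k IH =>
    have c1 := child_eq fn k w 1 (by omega) hw (fun st' w' h => IH st' w' h)
    have c2 := child_eq fn k w 2 (by omega) hw (fun st' w' h => IH st' w' h)
    have c3 := child_eq fn k w 3 (by omega) hw (fun st' w' h => IH st' w' h)
    simp only [fA, gRec, hw, Bool.false_eq_true, if_false]
    by_cases hgt : st > fn
    · simp [hgt]
    · by_cases heq : st = fn
      · simp [hgt, heq]
      · rw [if_neg hgt, if_neg heq, if_neg hgt, if_neg heq,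
          show (['1'] : List Char) = [mvChar 1] from rfl,
          show (['2'] : List Char) = [mvChar 2] from rfl,
          show (['3'] : List Char) = [mvChar 3] from rfl,
          c1 (st + 1), c2 (st * 2), c3 (st * 3)]

lemma gRec_fuel_irrel (fn : Int) (f1 : Nat) : ∀ (f2 : Nat) (v last run : Int), 1 ≤ v →
    (fn - v).toNat < f1 → (fn - v).toNat < f2 →
    gRec fn f1 v last run = gRec fn f2 v last run := by
  induction f1 with
  | zero => intro f2 v last run hv h1 h2; omega
  | succ a IH =>
    intro f2 v last run hv h1 h2
    cases f2 with
    | zero => omega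
    | succ b =>
      simp only [gRec]
      by_cases hgt : v > fn
      · simp [hgt]
      · by_cases heq : v = fn
        · simp [heq]
        · rw [if_neg hgt, if_neg heq, if_neg hgt, if_neg heq]
          have e1 : (if last ≠ 1 then gRec fn a (v + 1) 1 1
                     else if run < 2 then gRec fn a (v + 1) 1 (run + 1) else 0)
                  = (if last ≠ 1 then gRec fn b (v + 1) 1 1
                     else if run < 2 then gRec fn b (v + 1) 1 (run + 1) else 0) := by
            split_ifs
            · exact IH b (v + 1) 1 1 (by omega) (by omega) (by omega)
            · exact IH b (v + 1) 1 (run + 1) (by omega) (by omega) (by omega)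
            · rfl
          have e2 : (if last ≠ 2 then gRec fn a (v * 2) 2 1
                     else if run < 2 then gRec fn a (v * 2) 2 (run + 1) else 0)
                  = (if last ≠ 2 then gRec fn b (v * 2) 2 1
                     else if run < 2 then gRec fn b (v * 2) 2 (run + 1) else 0) := by
            split_ifs
            · exact IH b (v * 2) 2 1 (by omega) (by omega) (by omega)
            · exact IH b (v * 2) 2 (run + 1) (by omega) (by omega) (by omega)
            · rfl
          have e3 : (if last ≠ 3 then gRec fn a (v * 3) 3 1
                     else if run < 2 then gRec fn a (v * 3) 3 (run + 1) else 0)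
                  = (if last ≠ 3 then gRec fn b (v * 3) 3 1
                     else if run < 2 then gRec fn b (v * 3) 3 (run + 1) else 0) := by
            split_ifs
            · exact IH b (v * 3) 3 1 (by omega) (by omega) (by omega)
            · exact IH b (v * 3) 3 (run + 1) (by omega) (by omega) (by omega)
            · rfl
          rw [e1, e2, e3]

def gStable (fn v last run : Int) : Int := gRec fn ((fn - v).toNat + 1) v last run

lemma gStable_eq (fn v last run : Int) (hv : 1 ≤ v ∨ fn ≤ v) :
    gStable fn v last run =
      if v > fn then 0
      else if v = fn then 1
      else
        (if last ≠ 1 then gStable fn (v + 1) 1 1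
         else if run < 2 then gStable fn (v + 1) 1 (run + 1) else 0)
        + (if last ≠ 2 then gStable fn (v * 2) 2 1
           else if run < 2 then gStable fn (v * 2) 2 (run + 1) else 0)
        + (if last ≠ 3 then gStable fn (v * 3) 3 1
           else if run < 2 then gStable fn (v * 3) 3 (run + 1) else 0) := by
  conv_lhs => rw [gStable]
  by_cases hgt : v > fn
  · simp [gRec, hgt]
  · by_cases heq : v = fn
    · simp [gRec, heq]
    · have hv1 : 1 ≤ v := by rcases hv with h | h <;> omega
      simp only [gRec]
      rw [if_neg hgt, if_neg heq, if_neg hgt, if_neg heq]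
      have e1 : ∀ l r : Int, gRec fn ((fn - v).toNat) (v + 1) l r = gRec fn ((fn - (v + 1)).toNat + 1) (v + 1) l r :=
        fun l r => gRec_fuel_irrel fn _ _ (v + 1) l r (by omega) (by omega) (by omega)
      have e2 : ∀ l r : Int, gRec fn ((fn - v).toNat) (v * 2) l r = gRec fn ((fn - (v * 2)).toNat + 1) (v * 2) l r :=
        fun l r => gRec_fuel_irrel fn _ _ (v * 2) l r (by omega) (by omega) (by omega)
      have e3 : ∀ l r : Int, gRec fn ((fn - v).toNat) (v * 3) l r = gRec fn ((fn - (v * 3)).toNat + 1) (v * 3) l r :=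
        fun l r => gRec_fuel_irrel fn _ _ (v * 3) l r (by omega) (by omega) (by omega)
      have E1 : (if last ≠ 1 then gRec fn ((fn - v).toNat) (v + 1) 1 1
                 else if run < 2 then gRec fn ((fn - v).toNat) (v + 1) 1 (run + 1) else 0)
               = (if last ≠ 1 then gStable fn (v + 1) 1 1
                 else if run < 2 then gStable fn (v + 1) 1 (run + 1) else 0) := by
        unfold gStable; split_ifs
        · exact e1 1 1
        · exact e1 1 (run + 1)
        · rfl
      have E2 : (if last ≠ 2 then gRec fn ((fn - v).toNat) (v * 2) 2 1
                 else if run < 2 then gRec fn ((fn - v).toNat) (v * 2) 2 (run + 1) else 0)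
               = (if last ≠ 2 then gStable fn (v * 2) 2 1
                 else if run < 2 then gStable fn (v * 2) 2 (run + 1) else 0) := by
        unfold gStable; split_ifs
        · exact e2 2 1
        · exact e2 2 (run + 1)
        · rfl
      have E3 : (if last ≠ 3 then gRec fn ((fn - v).toNat) (v * 3) 3 1
                 else if run < 2 then gRec fn ((fn - v).toNat) (v * 3) 3 (run + 1) else 0)
               = (if last ≠ 3 then gStable fn (v * 3) 3 1
                 else if run < 2 then gStable fn (v * 3) 3 (run + 1) else 0) := by
        unfold gStable; split_ifs
        · exact e3 3 1
        · exact e3 3 (run + 1)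
        · rfl
      rw [E1, E2, E3]

def MemoInv (fn : Int) (memo : PySem.Dict (Int × Int × Int) Int) : Prop :=
  ∀ v last run t, memo.get? (v, last, run) = some t → t = gStable fn v last run

lemma fB_eq_gStable (fn : Int) (fuel : Nat) : ∀ (v last run : Int)
    (memo : PySem.Dict (Int × Int × Int) Int),
    (1 ≤ v ∨ fn ≤ v) → (fn - v).toNat < fuel → MemoInv fn memo →
    (fB fn fuel v last run memo).1 = gStable fn v last run ∧
      MemoInv fn (fB fn fuel v last run memo).2 := by
  induction fuel with
  | zero => intro v last run memo hv hf hinv; omega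
  | succ k IH =>
    intro v last run memo hv hf hinv
    by_cases hgt : v > fn
    · refine ⟨?_, ?_⟩
      · rw [gStable_eq fn v last run hv, if_pos hgt]; simp [fB, hgt]
      · simp [fB, hgt]; exact hinv
    · by_cases heq : v = fn
      · refine ⟨?_, ?_⟩
        · rw [gStable_eq fn v last run hv, if_neg hgt, if_pos heq]; simp [fB, hgt, heq]
        · simp [fB, hgt, heq]; exact hinv
      · have hv1 : 1 ≤ v := by rcases hv with h | h <;> omega
        rcases hmg : memo.get? (v, last, run) with _ | t
        · -- memo miss
          have H1 : (if last ≠ 1 then fB fn k (v + 1) 1 1 memo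
                     else if run < 2 then fB fn k (v + 1) 1 (run + 1) memo else (0, memo)).1
                    = (if last ≠ 1 then gStable fn (v + 1) 1 1
                       else if run < 2 then gStable fn (v + 1) 1 (run + 1) else 0) ∧
                    MemoInv fn (if last ≠ 1 then fB fn k (v + 1) 1 1 memo
                     else if run < 2 then fB fn k (v + 1) 1 (run + 1) memo else (0, memo)).2 := by
            split_ifs
            · exact IH (v + 1) 1 1 memo (by omega) (by omega) hinv
            · exact IH (v + 1) 1 (run + 1) memo (by omega) (by omega) hinv
            · exact ⟨rfl, hinv⟩
          set r1 := (if last ≠ 1 then fB fn k (v + 1) 1 1 memo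
                     else if run < 2 then fB fn k (v + 1) 1 (run + 1) memo else (0, memo)) with hr1
          have H2 : (if last ≠ 2 then fB fn k (v * 2) 2 1 r1.2
                     else if run < 2 then fB fn k (v * 2) 2 (run + 1) r1.2 else (0, r1.2)).1
                    = (if last ≠ 2 then gStable fn (v * 2) 2 1
                       else if run < 2 then gStable fn (v * 2) 2 (run + 1) else 0) ∧
                    MemoInv fn (if last ≠ 2 then fB fn k (v * 2) 2 1 r1.2
                     else if run < 2 then fB fn k (v * 2) 2 (run + 1) r1.2 else (0, r1.2)).2 := by
            split_ifs
            · exact IH (v * 2) 2 1 r1.2 (by omega) (by omega) H1.2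
            · exact IH (v * 2) 2 (run + 1) r1.2 (by omega) (by omega) H1.2
            · exact ⟨rfl, H1.2⟩
          set r2 := (if last ≠ 2 then fB fn k (v * 2) 2 1 r1.2
                     else if run < 2 then fB fn k (v * 2) 2 (run + 1) r1.2 else (0, r1.2)) with hr2
          have H3 : (if last ≠ 3 then fB fn k (v * 3) 3 1 r2.2
                     else if run < 2 then fB fn k (v * 3) 3 (run + 1) r2.2 else (0, r2.2)).1
                    = (if last ≠ 3 then gStable fn (v * 3) 3 1
                       else if run < 2 then gStable fn (v * 3) 3 (run + 1) else 0) ∧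
                    MemoInv fn (if last ≠ 3 then fB fn k (v * 3) 3 1 r2.2
                     else if run < 2 then fB fn k (v * 3) 3 (run + 1) r2.2 else (0, r2.2)).2 := by
            split_ifs
            · exact IH (v * 3) 3 1 r2.2 (by omega) (by omega) H2.2
            · exact IH (v * 3) 3 (run + 1) r2.2 (by omega) (by omega) H2.2
            · exact ⟨rfl, H2.2⟩
          set r3 := (if last ≠ 3 then fB fn k (v * 3) 3 1 r2.2
                     else if run < 2 then fB fn k (v * 3) 3 (run + 1) r2.2 else (0, r2.2)) with hr3
          have hres : fB fn (k + 1) v last run memo =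
              (r1.1 + r2.1 + r3.1, r3.2.insert (v, last, run) (r1.1 + r2.1 + r3.1)) := by
            simp only [fB, if_neg hgt, if_neg heq, hmg]
            rw [← hr1, ← hr2, ← hr3]
          have htot : r1.1 + r2.1 + r3.1 = gStable fn v last run := by
            rw [H1.1, H2.1, H3.1, gStable_eq fn v last run hv, if_neg hgt, if_neg heq]
          refine ⟨by rw [hres]; exact htot, ?_⟩
          rw [hres]
          intro v' l' r' t' hget
          rw [PySem.Dict.get?_insert] at hget
          by_cases hk : ((v', l', r') : Int × Int × Int) = (v, last, run)
          · rw [if_pos hk] at hget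
            injection hget with hget'
            obtain ⟨e1, e2, e3⟩ : v' = v ∧ l' = last ∧ r' = run := by
              simpa [Prod.ext_iff] using hk
            rw [e1, e2, e3, ← hget', htot]
          · rw [if_neg hk] at hget
            exact H3.2 v' l' r' t' hget
        · -- memo hit
          have hres : fB fn (k + 1) v last run memo = (t, memo) := by
            simp only [fB, if_neg hgt, if_neg heq, hmg]
          rw [hres]
          exact ⟨hinv v last run t hmg, hinv⟩

-- ===== VERDICT (by name: the statement is the Claim_ definition above) =====
theorem f_spec : Claim_equal_f := by
  intro st fn way _ hpre
  unfold Spec_f f f_alt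
  by_cases ht : hasTrip way.toList = true
  · rw [fA_triple fn _ st _ ht]; simp [ht]
  · have ht' : hasTrip way.toList = false := by cases h : hasTrip way.toList <;> simp_all
    simp only [ht', Bool.false_eq_true, if_false]
    rw [fA_eq_gRec fn _ st _ ht']
    have hv : 1 ≤ st ∨ fn ≤ st := by
      rcases hpre with h | h | h
      · exact Or.inl h
      · exact Or.inr h
      · rw [ht'] at h; cases h
    have hmain := fB_eq_gStable fn ((fn - st).toNat + 1) st
      (lrOf way.toList).1 (lrOf way.toList).2 PySem.Dict.empty hv (by omega)
      (by intro a b c t h; rw [PySem.Dict.get?_empty] at h; cases h)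
    rw [hmain.1]
    rfl
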